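-- pv_equiv track=rewrite | github.com/Jacky-lim-data-analyst/project_euler_sol | champernowne_constant.py | output_champernowne_constant
-- ===== SOURCE A (Python) =====
-- def output_champernowne_constant(upper_digit_limit: int) -> str:
--     """Generate string of fractions
--     Args:
--         upper_digit_limit: int, number of digit
--     Returns:
--         String of fractional digits"""
--     starting_num = 1
--     frac_digit_str = ''
--     num_digits = 0
--     while num_digits < upper_digit_limit:
--         frac_digit_str += str(starting_num)
--         starting_num += 1
--         num_digits = len(frac_digit_str)
--
--     return frac_digit_str
-- ===== SOURCE B (Python) =====
-- def output_champernowne_constant(upper_digit_limit: int) -> str: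
--     """Generate string of fractions
--     Args:
--         upper_digit_limit: int, number of digit
--     Returns:
--         String of fractional digits"""
--     if upper_digit_limit <= 0:
--         last = 0
--     else:
--         # find the last integer to include by block arithmetic:
--         # block e holds the 9*10**e numbers with e+1 digits
--         total = 0
--         e = 0
--         while True:
--             d = e + 1
--             block = 9 * 10 ** e * d
--             if total + block >= upper_digit_limit:
--                 last = 10 ** e - 1 + (upper_digit_limit - total + d - 1) // d
--                 break
--             total += block
--             e += 1
--     return ''.join(str(i) for i in range(1, last + 1))
-- ===== Notes on version B (the rewrite author's own statement) =====
-- stated objective: faster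
-- what changed: A grows a string number-by-number, re-measuring its length until it is long enough; B first computes the last integer to include arithmetically over digit-length blocks (each block holds the numbers with a fixed digit count, with a ceiling division inside the crossing block) and then emits the whole string in one join over the range up to that integer.
import Mathlib
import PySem

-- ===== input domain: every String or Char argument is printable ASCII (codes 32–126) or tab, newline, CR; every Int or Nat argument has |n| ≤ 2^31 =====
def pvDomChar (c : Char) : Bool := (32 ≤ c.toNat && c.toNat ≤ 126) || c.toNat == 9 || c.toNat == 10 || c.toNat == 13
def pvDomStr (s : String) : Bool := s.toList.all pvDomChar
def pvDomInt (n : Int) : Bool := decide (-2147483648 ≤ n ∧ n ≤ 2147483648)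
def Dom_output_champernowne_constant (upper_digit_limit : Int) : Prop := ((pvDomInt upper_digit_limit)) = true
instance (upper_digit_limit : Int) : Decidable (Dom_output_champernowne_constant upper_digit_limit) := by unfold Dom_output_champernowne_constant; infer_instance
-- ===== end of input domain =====

-- B replaces A's grow-until-long-enough string loop by block arithmetic that computes the
-- last integer to include, then builds the string in one join (alternative decomposition).


-- number of decimal digits of n (helper to prove the ports' loops terminate)
def digitsLen (n : Nat) : Nat :=
  if n < 10 then 1 else digitsLen (n / 10) + 1
decreasing_by exact Nat.div_lt_self (by omega) (by norm_num)

lemma toDigitsCore_len (f : Nat) : ∀ (n : Nat) (l : List Char), n < f →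
    (Nat.toDigitsCore 10 f n l).length = digitsLen n + l.length := by
  induction f with
  | zero => intro n l h; omega
  | succ f ih =>
    intro n l h
    rw [Nat.toDigitsCore]
    by_cases h10 : n / 10 = 0
    · rw [if_pos h10, digitsLen]
      simp [Nat.div_eq_zero_iff] at h10
      simp [if_pos h10]; omega
    · rw [if_neg h10, digitsLen, if_neg (by omega : ¬ n < 10)]
      rw [ih (n / 10) _ (by omega)]
      simp; omega

lemma toDigits_len (n : Nat) : (Nat.toDigits 10 n).length = digitsLen n := by
  rw [Nat.toDigits, toDigitsCore_len (n + 1) n [] (by omega)]; simp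

lemma digitsLen_pos (n : Nat) : 1 ≤ digitsLen n := by
  rw [digitsLen]; split <;> omega

lemma toChars_len_pos (n : Int) : 1 ≤ (PySem.Int.toChars n).length := by
  rw [PySem.Int.toChars]
  split
  · simp
  · rw [toDigits_len]; exact digitsLen_pos _

-- ===== PORT A =====
-- the while loop: append str(starting_num) while num_digits (= current length) < limit
def aLoop (upper_digit_limit : Int) (frac_digit_str : List Char) (starting_num : Int) : List Char :=
  if (frac_digit_str.length : Int) < upper_digit_limit then
    aLoop upper_digit_limit (frac_digit_str ++ PySem.Int.toChars starting_num) (starting_num + 1)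
  else frac_digit_str
termination_by (upper_digit_limit - frac_digit_str.length).toNat
decreasing_by
  have := toChars_len_pos starting_num
  simp only [List.length_append]
  omega

def output_champernowne_constant (upper_digit_limit : Int) : String :=
  String.ofList (aLoop upper_digit_limit [] 1)

-- ===== PORT B =====
-- the block loop: numbers with e+1 digits form block e; find the last integer to include
def bLoop (L total e : Nat) : Nat :=
  let d := e + 1
  let block := 9 * 10 ^ e * d
  if total + block < L then bLoop L (total + block) (e + 1)
  else 10 ^ e - 1 + (L - total + d - 1) / d
termination_by L - total
decreasing_by
  have : 0 < 9 * 10 ^ e * (e + 1) := by positivity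
  omega

def output_champernowne_constant_alt (upper_digit_limit : Int) : String :=
  let last : Int := if upper_digit_limit ≤ 0 then 0 else (bLoop upper_digit_limit.toNat 0 0 : Int)
  String.ofList (((PySem.List.pyRange 1 (last + 1) 1).map PySem.Int.toChars).flatten)

-- ===== PRECONDITION & SPEC =====
def Spec_output_champernowne_constant (upper_digit_limit : Int) (out : String) : Prop := out = output_champernowne_constant_alt upper_digit_limit
instance (upper_digit_limit : Int) (out : String) : Decidable (Spec_output_champernowne_constant upper_digit_limit out) := by unfold Spec_output_champernowne_constant; infer_instance

-- ===== CLAIM (what is proved, stated in full; the proofs are below) =====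
def Claim_equal_output_champernowne_constant : Prop := ∀ (upper_digit_limit : Int), Dom_output_champernowne_constant upper_digit_limit → Spec_output_champernowne_constant upper_digit_limit (output_champernowne_constant upper_digit_limit)

-- ===== LEMMAS AND PROOFS =====

-- J m = Champernowne string of 1..m;  Len m = its length
def J : Nat → List Char
  | 0 => []
  | m + 1 => J m ++ Nat.toDigits 10 (m + 1)

def Len (m : Nat) : Nat := (J m).length

lemma Len_succ (m : Nat) : Len (m + 1) = Len m + digitsLen (m + 1) := by
  simp [Len, J, toDigits_len]

lemma Len_mono {a b : Nat} (h : a ≤ b) : Len a ≤ Len b := by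
  induction b with
  | zero =>
    have ha : a = 0 := by omega
    rw [ha]
  | succ b ih =>
    rcases Nat.lt_or_ge a (b + 1) with h' | h'
    · have h1 := Len_succ b; have h2 := ih (by omega); omega
    · have ha : a = b + 1 := by omega
      rw [ha]

lemma digitsLen_eq (e : Nat) : ∀ n, 10 ^ e ≤ n → n < 10 ^ (e + 1) → digitsLen n = e + 1 := by
  induction e with
  | zero => intro n h1 h2; rw [digitsLen, if_pos (by simpa using h2)]
  | succ e ih =>
    intro n h1 h2
    have hp : (10:Nat) ^ (e + 1) = 10 ^ e * 10 := by ring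
    have h10 : 10 ≤ n := by
      have : (10:Nat) ≤ 10 ^ (e + 1) := by
        calc (10:Nat) = 10 ^ 1 := by norm_num
        _ ≤ 10 ^ (e + 1) := Nat.pow_le_pow_right (by norm_num) (by omega)
      omega
    rw [digitsLen, if_neg (by omega)]
    rw [ih (n / 10) (by rw [Nat.le_div_iff_mul_le (by norm_num)]; omega)
        (by rw [Nat.div_lt_iff_lt_mul (by norm_num)]
            have hp2 : (10:Nat) ^ (e + 1 + 1) = 10 ^ (e + 1) * 10 := by ring
            omega)]

-- Len over a run of k numbers all having e+1 digits
lemma Len_run (e : Nat) : ∀ (k a : Nat), 10 ^ e ≤ a + 1 → a + k < 10 ^ (e + 1) →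
    Len (a + k) = Len a + k * (e + 1) := by
  intro k
  induction k with
  | zero => simp
  | succ k ih =>
    intro a h1 h2
    have hd : digitsLen (a + k + 1) = e + 1 := digitsLen_eq e _ (by omega) (by omega)
    have hs : Len (a + (k + 1)) = Len (a + k) + digitsLen (a + k + 1) := by
      have := Len_succ (a + k)
      omega
    rw [hs, ih a h1 (by omega), hd]
    ring

lemma Len_block (e : Nat) : Len (10 ^ (e + 1) - 1) = Len (10 ^ e - 1) + 9 * 10 ^ e * (e + 1) := by
  have hpos : 1 ≤ (10:Nat) ^ e := Nat.one_le_pow _ _ (by norm_num)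
  have hp : (10:Nat) ^ (e + 1) = 10 ^ e * 10 := by ring
  have h := Len_run e (9 * 10 ^ e) (10 ^ e - 1) (by omega) (by omega)
  have he : 10 ^ e - 1 + 9 * 10 ^ e = 10 ^ (e + 1) - 1 := by omega
  rw [he] at h
  rw [h]

lemma bLoop_spec_aux : ∀ (fuel : Nat) (total e L : Nat), L ≤ total + fuel →
    0 < L → total = Len (10 ^ e - 1) → total < L →
    1 ≤ bLoop L total e ∧ Len (bLoop L total e - 1) < L ∧ L ≤ Len (bLoop L total e) := by
  intro fuel
  induction fuel with
  | zero => intro total e L hf hL htot hlt; omega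
  | succ fuel ih =>
    intro total e L hf hL htot hlt
    have hpos : 1 ≤ (10:Nat) ^ e := Nat.one_le_pow _ _ (by norm_num)
    have hbpos : 0 < 9 * 10 ^ e * (e + 1) := by positivity
    rw [bLoop]
    split_ifs with h
    · exact ih (total + 9 * 10 ^ e * (e + 1)) (e + 1) L (by omega) hL
        (by rw [htot, Len_block]) h
    · simp only [not_lt] at h
      set d := e + 1 with hd
      set q := (L - total + d - 1) / d with hq
      have hne : 1 ≤ L - total := by omega
      have hdm := Nat.div_add_mod (L - total + d - 1) d
      have hmlt : (L - total + d - 1) % d < d := Nat.mod_lt _ (by omega)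
      set P := d * q with hP
      have hq1 : 1 ≤ q := by
        rw [hq, Nat.le_div_iff_mul_le (by omega : 0 < d)]; omega
      have hmul : d * q < d * (9 * 10 ^ e + 1) := by
        have hr : d * (9 * 10 ^ e + 1) = 9 * 10 ^ e * d + d := by ring
        omega
      have hqub : q ≤ 9 * 10 ^ e := by
        have := Nat.lt_of_mul_lt_mul_left hmul; omega
      have hPlb : L - total ≤ P := by omega
      have hPub : P < L - total + d := by omega
      have hpow : (10:Nat) ^ (e + 1) = 10 ^ e * 10 := by ring
      refine ⟨by omega, ?_, ?_⟩
      · have h1 : Len (10 ^ e - 1 + (q - 1)) = Len (10 ^ e - 1) + (q - 1) * (e + 1) :=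
          Len_run e _ _ (by omega) (by omega)
        have hrm : 10 ^ e - 1 + q - 1 = 10 ^ e - 1 + (q - 1) := by omega
        rw [hrm, h1]
        have hqd : (q - 1) * (e + 1) = P - d := by
          obtain ⟨q', hq'⟩ := Nat.exists_eq_add_of_le hq1
          have hm1 : q - 1 = q' := by omega
          have hc1 : d * q = d + d * q' := by rw [hq']; ring
          have hc2 : q' * (e + 1) = d * q' := by rw [hd]; ring
          rw [hm1]
          omega
        omega
      · have h1 : Len (10 ^ e - 1 + q) = Len (10 ^ e - 1) + q * (e + 1) :=
          Len_run e _ _ (by omega) (by omega)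
        rw [h1]
        have : q * (e + 1) = P := by rw [hP, hd]; ring
        omega

lemma bLoop_spec (L total e : Nat) (hL : 0 < L) (htot : total = Len (10 ^ e - 1))
    (hlt : total < L) :
    1 ≤ bLoop L total e ∧ Len (bLoop L total e - 1) < L ∧ L ≤ Len (bLoop L total e) :=
  bLoop_spec_aux L total e L (by omega) hL htot hlt

lemma toChars_natCast (m : Nat) : PySem.Int.toChars (m : Int) = Nat.toDigits 10 m := by
  rw [PySem.Int.toChars, if_neg (by omega)]
  simp

lemma aLoop_eq (limit : Int) (L : Nat) (hstop : limit ≤ (Len L : Int))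
    (hbelow : ∀ k, k < L → (Len k : Int) < limit) :
    ∀ fuel n : Nat, 1 ≤ n → n ≤ L + 1 → L + 1 - n = fuel →
      aLoop limit (J (n - 1)) (n : Int) = J L := by
  intro fuel
  induction fuel with
  | zero =>
    intro n h1 h2 h0
    have hn : n = L + 1 := by omega
    rw [aLoop, if_neg]
    · rw [hn]; simp
    · rw [hn]
      simpa [Len] using not_lt.mpr hstop
  | succ fuel ih =>
    intro n h1 h2 h0
    have hnL : n ≤ L := by omega
    rw [aLoop, if_pos]
    · have hJ : J (n - 1) ++ PySem.Int.toChars (n : Int) = J n := by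
        rw [toChars_natCast]
        have : n = (n - 1) + 1 := by omega
        rw [this, J]
        simp
      have hc : ((n : Int) + 1) = ((n + 1 : Nat) : Int) := by push_cast; ring
      rw [hJ, hc]
      have := ih (n + 1) (by omega) (by omega) (by omega)
      rwa [show n + 1 - 1 = n from rfl] at this
    · have := hbelow (n - 1) (by omega)
      simpa [Len] using this

lemma join_eq : ∀ m : Nat,
    ((PySem.List.pyRange 1 ((m : Int) + 1) 1).map PySem.Int.toChars).flatten = J m := by
  intro m
  induction m with
  | zero => rw [PySem.List.pyRange_one_eq_nil (by norm_num)]; rfl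
  | succ m ih =>
    have h : ((m + 1 : Nat) : Int) + 1 = ((m : Int) + 1) + 1 := by push_cast; ring
    rw [h, PySem.List.pyRange_one_succ_right (by omega)]
    simp only [List.map_append, List.flatten_append]
    rw [ih]
    have hc : ((m : Int) + 1) = ((m + 1 : Nat) : Int) := by push_cast; ring
    have ht : PySem.Int.toChars ((m : Int) + 1) = Nat.toDigits 10 (m + 1) := by
      rw [hc]; exact toChars_natCast _
    simp [ht, J]

-- ===== VERDICT (by name: the statement is the Claim_ definition above) =====
theorem output_champernowne_constant_spec : Claim_equal_output_champernowne_constant := by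
  intro limit _
  unfold Spec_output_champernowne_constant output_champernowne_constant output_champernowne_constant_alt
  by_cases hl : limit ≤ 0
  · rw [aLoop, if_neg (by simpa using hl)]
    simp [hl]
  · rw [if_neg hl]
    replace hl : 0 < limit := by omega
    set L' := limit.toNat with hL'
    have hlim : limit = (L' : Int) := by omega
    have hL'pos : 0 < L' := by omega
    obtain ⟨h1, h2, h3⟩ := bLoop_spec L' 0 0 hL'pos (by simp [Len, J]) (by omega)
    set r := bLoop L' 0 0 with hr
    have hbelow : ∀ k, k < r → (Len k : Int) < limit := by
      intro k hk
      have : Len k ≤ Len (r - 1) := Len_mono (by omega)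
      omega
    have hA : aLoop limit (J 0) ((1 : Nat) : Int) = J r :=
      aLoop_eq limit r (by omega) hbelow r 1 (by omega) (by omega) (by omega)
    have hA' : aLoop limit [] 1 = J r := by simpa [J] using hA
    rw [hA']
    show String.ofList (J r) =
      String.ofList (((PySem.List.pyRange 1 ((r : Int) + 1) 1).map PySem.Int.toChars).flatten)
    rw [join_eq r]
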